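-- pv_equiv track=rewrite | github.com/svend4/meta | projects/hexdim/hexdim.py | all_subcubes
-- ===== SOURCE A (Python) =====
-- import itertools
--
-- def subcube(free_axes, base=0):
--     """
--     Подкуб Qₖ с k = len(free_axes) свободными осями.
--
--     free_axes: подмножество {0,1,2,3,4,5} — индексы свободных битов.
--     base: 6-битное число, значения фиксированных битов.
--     Возвращает frozenset из 2^k вершин.
--     """
--     free_axes = list(free_axes)
--     k = len(free_axes)
--     # Зафиксировать фиксированные биты из base, перебрать свободные
--     fixed_mask = ((1 << 6) - 1) ^ sum(1 << a for a in free_axes)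
--     fixed_val = base & fixed_mask
--     vertices = set()
--     for bits in range(1 << k):
--         h = fixed_val
--         for idx, axis in enumerate(free_axes):
--             if (bits >> idx) & 1:
--                 h |= (1 << axis)
--         vertices.add(h)
--     return frozenset(vertices)
--
-- def all_subcubes(k):
--     """
--     Все подкубы Qₖ в Q6.
--     Возвращает список (free_axes, base, vertices) — всего C(6,k) × 2^{6-k} наборов,
--     но уникальных по множеству вершин = C(6,k) × 2^{6-k}/2^{6-k}... нет:
--     фактически фиксированных бит 2^{6-k} вариантов → итого C(6,k) × 2^{6-k} подкубов.
--     """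
--     from math import comb
--     result = []
--     for axes in itertools.combinations(range(6), k):
--         free_axes = list(axes)
--         fixed_axes = [a for a in range(6) if a not in free_axes]
--         n_fixed = len(fixed_axes)
--         for fixed_bits in range(1 << n_fixed):
--             base = 0
--             for idx, fa in enumerate(fixed_axes):
--                 if (fixed_bits >> idx) & 1:
--                     base |= (1 << fa)
--             verts = subcube(free_axes, base)
--             result.append((free_axes, base, verts))
--     return result
-- ===== SOURCE B (Python) =====
-- import itertools
--
-- def all_subcubes(k):
--     # Partition Q6 by fixed-coordinate projection: one scan of all 64 vertices
--     # per axis combination, grouped by base = v & fixed_mask.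
--     full = (1 << 6) - 1
--     result = []
--     for axes in itertools.combinations(range(6), k):
--         free_mask = 0
--         for a in axes:
--             free_mask |= 1 << a
--         fixed_mask = full ^ free_mask
--         groups = {}
--         for v in range(64):
--             groups.setdefault(v & fixed_mask, set()).add(v)
--         for base in sorted(groups):
--             result.append((list(axes), base, frozenset(groups[base])))
--     return result
-- ===== Notes on version B (the rewrite author's own statement) =====
-- stated objective: alternative
-- what changed: Instead of constructing each subcube by enumerating its 2^k free-bit patterns per base, B scans all 64 vertices once per axis combination and partitions them into a dict keyed by base = v & fixed_mask, then emits the groups in increasing base order.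
import Mathlib
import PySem

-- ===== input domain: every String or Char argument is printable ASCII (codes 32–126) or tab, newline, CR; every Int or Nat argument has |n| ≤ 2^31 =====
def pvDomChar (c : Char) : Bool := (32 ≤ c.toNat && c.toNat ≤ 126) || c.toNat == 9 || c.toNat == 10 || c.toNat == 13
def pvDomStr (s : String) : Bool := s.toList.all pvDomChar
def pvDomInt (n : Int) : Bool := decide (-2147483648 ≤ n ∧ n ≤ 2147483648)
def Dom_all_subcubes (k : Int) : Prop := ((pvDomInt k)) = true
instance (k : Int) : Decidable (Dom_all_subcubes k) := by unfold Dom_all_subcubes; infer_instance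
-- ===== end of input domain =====

-- B partitions all 64 vertices by their fixed-coordinate projection (one scan grouped
-- into a dict keyed by v & fixed_mask) instead of constructing each subcube from its
-- free-bit patterns; objective: alternative decomposition.

-- ===== PORT A =====
-- helper subcube(free_axes, base): builds the frozenset of 2^k vertices
def subcube (free_axes : List Int) (base : Int) : List Int :=
  let k := free_axes.length
  let fixed_mask := PySem.Int.bxor (((1:Int) <<< 6) - 1)
      ((free_axes.map (fun a => (1:Int) <<< a.toNat)).sum)
  let fixed_val := PySem.Int.band base fixed_mask
  let vertices : PySem.Set Int :=
    (PySem.List.pyRange 0 ((1:Int) <<< k) 1).foldl (fun s bits =>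
      let h := (PySem.List.enumerate free_axes).foldl (fun h p =>
        if PySem.Int.band (bits >>> p.1.toNat) 1 = 1 then
          PySem.Int.bor h ((1:Int) <<< p.2.toNat)
        else h) fixed_val
      PySem.Set.add s h) PySem.Set.empty
  vertices

def all_subcubes (k : Int) : List (List Int × Int × List Int) :=
  (PySem.List.combinations (PySem.List.pyRange 0 6 1) k.toNat).foldl (fun result axes =>
    let free_axes := axes
    let fixed_axes := (PySem.List.pyRange 0 6 1).filter (fun a => ¬ a ∈ free_axes)
    let n_fixed := fixed_axes.length
    (PySem.List.pyRange 0 ((1:Int) <<< n_fixed) 1).foldl (fun result fixed_bits =>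
      let base := (PySem.List.enumerate fixed_axes).foldl (fun base p =>
        if PySem.Int.band (fixed_bits >>> p.1.toNat) 1 = 1 then
          PySem.Int.bor base ((1:Int) <<< p.2.toNat)
        else base) 0
      let verts := subcube free_axes base
      result ++ [(free_axes, base, verts)]) result) []

-- ===== PORT B =====
def all_subcubes_alt (k : Int) : List (List Int × Int × List Int) :=
  let full : Int := ((1:Int) <<< 6) - 1
  (PySem.List.combinations (PySem.List.pyRange 0 6 1) k.toNat).foldl (fun result axes =>
    let free_mask := axes.foldl (fun m a => PySem.Int.bor m ((1:Int) <<< a.toNat)) 0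
    let fixed_mask := PySem.Int.bxor full free_mask
    let groups : PySem.Dict Int (PySem.Set Int) :=
      (PySem.List.pyRange 0 64 1).foldl (fun g v =>
        let key := PySem.Int.band v fixed_mask
        PySem.Dict.insert g key (PySem.Set.add (PySem.Dict.getD g key PySem.Set.empty) v))
        PySem.Dict.empty
    (PySem.List.sorted groups.keys (fun x => x) false).foldl (fun result base =>
      result ++ [(axes, base, PySem.Dict.getD groups base PySem.Set.empty)]) result) []

-- ===== PRECONDITION & SPEC =====
-- Pre_ excludes k < 0, where Python's itertools.combinations raises ValueError in both programs.
def Pre_all_subcubes (k : Int) : Prop := 0 ≤ k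
instance (k : Int) : Decidable (Pre_all_subcubes k) := by unfold Pre_all_subcubes; infer_instance
def pvWitness_all_subcubes : Int := 2

def Spec_all_subcubes (k : Int) (out : List (List Int × Int × List Int)) : Prop := out = all_subcubes_alt k
instance (k : Int) (out : List (List Int × Int × List Int)) : Decidable (Spec_all_subcubes k out) := by unfold Spec_all_subcubes; infer_instance

-- ===== CLAIM (what is proved, stated in full; the proofs are below) =====
def Claim_equal_all_subcubes : Prop := ∀ (k : Int), Dom_all_subcubes k → Pre_all_subcubes k → Spec_all_subcubes k (all_subcubes k)

-- ===== LEMMAS AND PROOFS =====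
-- For k > 6 both sides fold over combinations of a 6-element list taken k.toNat at a
-- time, which is empty, so both return [].
theorem all_subcubes_big (k : Int) (h : 6 < k) :
    all_subcubes k = all_subcubes_alt k := by
  have h6 : (PySem.List.pyRange 0 6 1).length < k.toNat := by
    have : (PySem.List.pyRange 0 6 1).length = 6 := by decide
    omega
  simp [all_subcubes, all_subcubes_alt,
    PySem.List.combinations_eq_nil_of_length_lt _ h6]

-- ===== VERDICT (by name: the statement is the Claim_ definition above) =====
set_option maxRecDepth 100000 in
set_option maxHeartbeats 2000000 in
theorem all_subcubes_spec : Claim_equal_all_subcubes := by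
  intro k _ hk
  unfold Spec_all_subcubes
  by_cases hbig : 6 < k
  · exact all_subcubes_big k hbig
  · unfold Pre_all_subcubes at hk
    interval_cases k <;> decide
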